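-- pv_equiv track=rewrite | github.com/pypi-data/pypi-mirror-240 | packages/datafiletoolbox/datafiletoolbox-0.52.40.tar.gz/datafiletoolbox-0.52.40/src/datafiletoolbox/_common/stringformat.py | splitDMMMY
-- ===== SOURCE A (Python) =====
-- def splitDMMMY(string):
--     mi, mf = -1, -1
--     for x in range(len(string)):
--         if not string[x].isdigit() and mf == -1:
--             mi = x
--         if string[x].isdigit() and mi > -1:
--             mf = x + 1
--             break
--     if mi > 0 and mf > 0:
--         return [string[:mi], string[mi:mf], string[mf:]]
-- ===== SOURCE B (Python) =====
-- def _runs(s):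
--     # run-length encoding of the string into maximal (is_digit, length) runs
--     if not s:
--         return []
--     d = s[0].isdigit()
--     n = 1
--     while n < len(s) and s[n].isdigit() == d:
--         n += 1
--     return [(d, n)] + _runs(s[n:])
--
--
-- def splitDMMMY(string):
--     # Two-stage: build the run-length encoding, then scan adjacent run pairs
--     # for the first non-digit run followed by a digit run.
--     runs = _runs(string)
--     pos = 0
--     for (d, n), (d2, _) in zip(runs, runs[1:]):
--         if not d and d2:
--             mi = pos + n - 1
--             return [string[:mi], string[mi:mi + 2], string[mi + 2:]] if mi > 0 else None
--         pos += n
--     return None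
-- ===== Notes on version B (the rewrite author's own statement) =====
-- stated objective: alternative
-- what changed: Replaces A's single-pass (mi, mf) character state machine with a two-stage algorithm: first build a run-length encoding of maximal digit/non-digit runs, then scan adjacent run pairs for the first non-digit run followed by a digit run.
import Mathlib
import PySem

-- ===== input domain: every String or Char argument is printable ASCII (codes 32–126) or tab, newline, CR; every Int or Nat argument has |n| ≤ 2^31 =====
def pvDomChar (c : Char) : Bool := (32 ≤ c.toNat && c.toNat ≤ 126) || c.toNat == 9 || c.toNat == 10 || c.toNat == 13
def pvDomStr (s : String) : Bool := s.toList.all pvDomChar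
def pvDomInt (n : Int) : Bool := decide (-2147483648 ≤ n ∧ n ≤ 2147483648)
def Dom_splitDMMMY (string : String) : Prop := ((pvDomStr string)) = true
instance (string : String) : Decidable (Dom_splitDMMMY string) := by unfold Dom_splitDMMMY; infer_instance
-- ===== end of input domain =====

-- B replaces A's (mi, mf) character state machine by a two-stage algorithm:
-- run-length encode the string into digit/non-digit runs, then scan adjacent
-- run pairs; equal return value everywhere (no mutation in either program).

-- ===== PORT A =====
-- the for-loop over range(len(string)) with mutable mi, mf and break
def splitDMMMY_loop : List Char → Nat → Int → Int → Int × Int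
  | [], _, mi, mf => (mi, mf)
  | c :: rest, x, mi, mf =>
    let mi' := if PySem.Chars.isdigit c = false ∧ mf = -1 then (x : Int) else mi
    if PySem.Chars.isdigit c = true ∧ mi' > -1 then (mi', (x : Int) + 1)
    else splitDMMMY_loop rest (x + 1) mi' mf

def splitDMMMY (string : String) : Option (List String) :=
  let p := splitDMMMY_loop string.toList 0 (-1) (-1)
  if p.1 > 0 ∧ p.2 > 0 then
    some [PySem.Str.slice string none (some p.1),
          PySem.Str.slice string (some p.1) (some p.2),
          PySem.Str.slice string (some p.2) none]
  else none

-- ===== PORT B =====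
-- _runs' while loop: count of leading chars whose digitness equals d
def runLen (d : Bool) : List Char → Nat
  | [] => 0
  | c :: cs => if PySem.Chars.isdigit c == d then 1 + runLen d cs else 0

-- _runs: run-length encoding into maximal (is_digit, length) runs
def runsOf : List Char → List (Bool × Nat)
  | [] => []
  | c :: cs =>
    let d := PySem.Chars.isdigit c
    let n := 1 + runLen d cs
    (d, n) :: runsOf ((c :: cs).drop n)
  termination_by l => l.length
  decreasing_by simp only [List.length_drop, List.length_cons]; omega

-- the for-loop over zip(runs, runs[1:]) with the pos accumulator
def scanRuns : List (Bool × Nat) → Nat → Option Nat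
  | (d, n) :: (d2, n2) :: rest, pos =>
    if d = false ∧ d2 = true then some (pos + n - 1)
    else scanRuns ((d2, n2) :: rest) (pos + n)
  | _, _ => none

def splitDMMMY_alt (string : String) : Option (List String) :=
  match scanRuns (runsOf string.toList) 0 with
  | some i =>
    if 0 < i then
      some [PySem.Str.slice string none (some (i : Int)),
            PySem.Str.slice string (some (i : Int)) (some ((i : Int) + 2)),
            PySem.Str.slice string (some ((i : Int) + 2)) none]
    else none
  | none => none

-- ===== PRECONDITION & SPEC =====
def Spec_splitDMMMY (string : String) (out : Option (List String)) : Prop := out = splitDMMMY_alt string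
instance (string : String) (out : Option (List String)) : Decidable (Spec_splitDMMMY string out) := by unfold Spec_splitDMMMY; infer_instance

-- ===== CLAIM (what is proved, stated in full; the proofs are below) =====
def Claim_equal_splitDMMMY : Prop := ∀ (string : String), Dom_splitDMMMY string → Spec_splitDMMMY string (splitDMMMY string)

-- ===== LEMMAS AND PROOFS =====

-- proof helper: pairwise scanner for the first non-digit→digit boundary
def pvAltLoop : List Char → Nat → Option Nat
  | a :: b :: rest, i =>
    if PySem.Chars.isdigit a = false ∧ PySem.Chars.isdigit b = true then some i
    else pvAltLoop (b :: rest) (i + 1)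
  | _, _ => none

-- proof helper: boundary finder with a "previous char was a non-digit" flag
def fb : Bool → List Char → Nat → Option Nat
  | _, [], _ => none
  | p, c :: cs, x =>
    if p ∧ PySem.Chars.isdigit c then some (x - 1)
    else fb (!PySem.Chars.isdigit c) cs (x + 1)

lemma altLoop_eq_fb (cs : List Char) : ∀ (c : Char) (x : Nat),
    pvAltLoop (c :: cs) x = fb (!PySem.Chars.isdigit c) cs (x + 1) := by
  induction cs with
  | nil => intro c x; simp [pvAltLoop, fb]
  | cons c' r ih =>
    intro c x
    simp only [pvAltLoop, fb, ih c' (x + 1)]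
    by_cases h1 : PySem.Chars.isdigit c = false <;>
      by_cases h2 : PySem.Chars.isdigit c' = true <;>
      simp [h1, h2]

lemma loop_eq_fb (cs : List Char) : ∀ (p : Bool) (x : Nat), (p = true → 1 ≤ x) →
    (match fb p cs x with
     | some j => splitDMMMY_loop cs x (if p then (x : Int) - 1 else -1) (-1) = ((j : Int), (j : Int) + 2)
     | none => (splitDMMMY_loop cs x (if p then (x : Int) - 1 else -1) (-1)).2 = -1) := by
  induction cs with
  | nil => intro p x _; cases p <;> simp [fb, splitDMMMY_loop]
  | cons c r ih =>
    intro p x hp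
    by_cases hd : PySem.Chars.isdigit c = true
    · cases p with
      | true =>
        have hx := hp rfl
        have : fb true (c :: r) x = some (x - 1) := by simp [fb, hd]
        rw [this]
        have hmi : ((x : Int) - 1) > -1 := by omega
        simp only [splitDMMMY_loop, hd]
        have hj : ((x - 1 : Nat) : Int) = (x : Int) - 1 := by omega
        simp [hmi, hj]
        omega
      | false =>
        have hfb : fb false (c :: r) x = fb false r (x + 1) := by simp [fb, hd]
        rw [hfb]
        have := ih false (x + 1) (by simp)
        simp only [if_neg (by simp : ¬ (false = true))] at this ⊢
        have hstep : splitDMMMY_loop (c :: r) x (-1) (-1) = splitDMMMY_loop r (x + 1) (-1) (-1) := by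
          simp [splitDMMMY_loop, hd]
        rw [hstep]; exact this
    · have hd' : PySem.Chars.isdigit c = false := by simpa using hd
      have hfb : fb p (c :: r) x = fb true r (x + 1) := by simp [fb, hd']
      rw [hfb]
      have := ih true (x + 1) (by omega)
      have hcast : ((x + 1 : Nat) : Int) - 1 = (x : Int) := by omega
      simp only [hcast] at this
      have hstep : splitDMMMY_loop (c :: r) x (if p then (x : Int) - 1 else -1) (-1)
          = splitDMMMY_loop r (x + 1) (x : Int) (-1) := by
        cases p <;> simp [splitDMMMY_loop, hd']
      rw [hstep]; exact this

-- runLen takes exactly the leading run of digitness d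
lemma runLen_take (cs : List Char) : ∀ (d : Bool),
    (∀ c ∈ cs.take (runLen d cs), PySem.Chars.isdigit c = d) ∧
    (∀ b bs, cs.drop (runLen d cs) = b :: bs → PySem.Chars.isdigit b ≠ d) := by
  induction cs with
  | nil => intro d; simp [runLen]
  | cons c r ih =>
    intro d
    by_cases h : PySem.Chars.isdigit c = d
    · have hrl : runLen d (c :: r) = runLen d r + 1 := by
        simp [runLen, h, Nat.add_comm]
      rw [hrl]
      constructor
      · intro x hx
        rw [List.take_succ_cons] at hx
        rcases List.mem_cons.1 hx with rfl | hx
        · exact h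
        · exact (ih d).1 x hx
      · intro b bs hb
        rw [List.drop_succ_cons] at hb
        exact (ih d).2 b bs hb
    · have hrl : runLen d (c :: r) = 0 := by simp [runLen, h]
      rw [hrl]
      constructor
      · simp
      · intro b bs hb
        simp only [List.drop_zero] at hb
        cases hb; exact h

-- pvAltLoop over a uniform-digitness run
lemma altLoop_uniform (l : List Char) : ∀ (d : Bool) (rest : List Char) (pos : Nat),
    l ≠ [] → (∀ c ∈ l, PySem.Chars.isdigit c = d) →
    pvAltLoop (l ++ rest) pos =
      (match rest with
       | [] => none
       | b :: _ =>
         if d = false ∧ PySem.Chars.isdigit b = true then some (pos + l.length - 1)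
         else pvAltLoop rest (pos + l.length)) := by
  induction l with
  | nil => intro _ _ _ h; exact absurd rfl h
  | cons c l' ih =>
    intro d rest pos _ hu
    have hc : PySem.Chars.isdigit c = d := hu c (by simp)
    cases l' with
    | nil =>
      cases rest with
      | nil => simp [pvAltLoop]
      | cons b bs =>
        simp only [List.singleton_append, pvAltLoop, hc, List.length_singleton]
        by_cases hb : d = false ∧ PySem.Chars.isdigit b = true
        · simp [hb.1, hb.2]
        · have : ¬ (d = false ∧ PySem.Chars.isdigit b = true) := hb
          rcases Decidable.em (d = false) with hd | hd
          · have hbb : ¬ PySem.Chars.isdigit b = true := fun h2 => this ⟨hd, h2⟩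
            simp [hd, hbb]
          · have hd' : d = true := by cases d <;> simp_all
            simp [hd']
    | cons c2 l'' =>
      have hc2 : PySem.Chars.isdigit c2 = d := hu c2 (by simp)
      simp only [List.cons_append]
      have hstep : pvAltLoop (c :: c2 :: (l'' ++ rest)) pos
          = pvAltLoop (c2 :: (l'' ++ rest)) (pos + 1) := by
        by_cases hd : d = true
        · simp [pvAltLoop, hc, hd]
        · have hd' : d = false := by cases d <;> simp_all
          simp [pvAltLoop, hc, hc2, hd']
      have hih := ih d rest (pos + 1) (by simp) (fun x hx => hu x (by simp [hx]))
      simp only [List.cons_append] at hih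
      rw [hstep, hih]
      cases rest with
      | nil => rfl
      | cons b bs =>
        have h1 : pos + 1 + (c2 :: l'').length - 1 = pos + (c :: c2 :: l'').length - 1 := by
          simp; omega
        have h2 : pos + 1 + (c2 :: l'').length = pos + (c :: c2 :: l'').length := by
          simp; omega
        rw [h1, h2]

-- the run scan equals the pairwise boundary scan
lemma scan_eq (n : Nat) : ∀ (cs : List Char), cs.length ≤ n → ∀ (pos : Nat),
    scanRuns (runsOf cs) pos = pvAltLoop cs pos := by
  induction n with
  | zero =>
    intro cs h pos
    have : cs = [] := List.eq_nil_of_length_eq_zero (by omega)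
    subst this; simp [runsOf, scanRuns, pvAltLoop]
  | succ m ih =>
    intro cs h pos
    cases cs with
    | nil => simp [runsOf, scanRuns, pvAltLoop]
    | cons c cs' =>
      set d := PySem.Chars.isdigit c with hd
      set k := runLen d cs' with hk
      have hspec := runLen_take cs' d
      have huni : ∀ x ∈ c :: cs'.take k, PySem.Chars.isdigit x = d := by
        intro x hx
        rcases List.mem_cons.1 hx with rfl | hx
        · exact hd.symm
        · exact hspec.1 x hx
      have hdrop : (c :: cs').drop (1 + k) = cs'.drop k := by
        rw [Nat.add_comm]; exact List.drop_succ_cons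
      have hrun : runsOf (c :: cs') = (d, 1 + k) :: runsOf (cs'.drop k) := by
        simp only [runsOf]
        rw [← hd, ← hk, hdrop]
      have hdecomp : c :: cs' = (c :: cs'.take k) ++ cs'.drop k := by
        simp [List.take_append_drop]
      rw [hrun]
      cases hrest : cs'.drop k with
      | nil =>
        rw [hrest] at hdecomp
        have hL' : pvAltLoop ((c :: cs'.take k) ++ ([] : List Char)) pos = none :=
          altLoop_uniform (c :: cs'.take k) d [] pos (by simp) huni
        conv_rhs => rw [hdecomp]
        rw [hL']
        simp [runsOf, scanRuns]
      | cons b bs =>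
        rw [hrest] at hdecomp
        have hL' : pvAltLoop ((c :: cs'.take k) ++ b :: bs) pos =
            (if d = false ∧ PySem.Chars.isdigit b = true
             then some (pos + (c :: cs'.take k).length - 1)
             else pvAltLoop (b :: bs) (pos + (c :: cs'.take k).length)) :=
          altLoop_uniform (c :: cs'.take k) d (b :: bs) pos (by simp) huni
        have hlenk : k ≤ cs'.length := by
          have := congrArg List.length hrest
          simp only [List.length_drop, List.length_cons] at this
          omega
        have hlen : (c :: cs'.take k).length = 1 + k := by
          simp [List.length_take]
          omega
        have hIH : scanRuns (runsOf (b :: bs)) (pos + (1 + k)) = pvAltLoop (b :: bs) (pos + (1 + k)) := by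
          apply ih
          have := congrArg List.length hrest
          simp only [List.length_drop, List.length_cons] at this h ⊢
          omega
        have hrun2 : runsOf (b :: bs)
            = (PySem.Chars.isdigit b, 1 + runLen (PySem.Chars.isdigit b) bs)
              :: runsOf ((b :: bs).drop (1 + runLen (PySem.Chars.isdigit b) bs)) := by
          simp only [runsOf]
        conv_rhs => rw [hdecomp]
        rw [hL', hlen]
        by_cases hcond : d = false ∧ PySem.Chars.isdigit b = true
        · rw [if_pos hcond, hrun2]
          simp only [scanRuns]
          rw [if_pos ⟨hcond.1, hcond.2⟩]
        · rw [if_neg hcond, hrun2]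
          simp only [scanRuns]
          rw [if_neg hcond, ← hrun2]
          exact hIH

-- ===== VERDICT (by name: the statement is the Claim_ definition above) =====
theorem splitDMMMY_spec : Claim_equal_splitDMMMY := by
  intro s _
  unfold Spec_splitDMMMY splitDMMMY splitDMMMY_alt
  rw [scan_eq s.toList.length s.toList (le_refl _) 0]
  cases hcs : s.toList with
  | nil => simp [splitDMMMY_loop, pvAltLoop]
  | cons c rest =>
    rw [altLoop_eq_fb]
    have key := loop_eq_fb rest (!PySem.Chars.isdigit c) 1 (fun _ => le_refl 1)
    have hstep : splitDMMMY_loop (c :: rest) 0 (-1) (-1)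
        = splitDMMMY_loop rest 1 (if (!PySem.Chars.isdigit c) then (1 : Int) - 1 else -1) (-1) := by
      by_cases hd : PySem.Chars.isdigit c = true
      · simp [splitDMMMY_loop, hd]
      · simp [splitDMMMY_loop, (by simpa using hd : PySem.Chars.isdigit c = false)]
    norm_num at key hstep
    cases hfb : fb (!PySem.Chars.isdigit c) rest 1 with
    | some j =>
      rw [hfb] at key
      simp only [hstep, key]
      by_cases hj : 0 < j
      · simp [hj, show (0 : Int) < (j : Int) + 2 by omega]
      · simp [hj]
    | none =>
      rw [hfb] at key
      simp only [hstep]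
      simp [key]
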